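-- pv_equiv track=rewrite | github.com/Adwaithpv/KrishMitra-AI | services/api/app/coordinator.py | _identify_relevant_agents
-- ===== SOURCE A (Python) =====
-- from typing import Dict, List, Any
--
-- def _identify_relevant_agents(query: str) -> List[str]:
--     """Identify which agents are relevant for the query"""
--     relevant = []
--
--     # Weather-related keywords - includes growing conditions
--     weather_keywords = ["weather", "rain", "rainfall", "drought", "temperature", "heat", "cold", "storm", "forecast", "alert", "growing", "grow", "suitable", "conditions", "climate", "season"]
--     if any(keyword in query for keyword in weather_keywords):
--         relevant.append("weather")
--
--     # Irrigation is weather-dependent, so include weather agent for irrigation queries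
--     irrigation_keywords = ["irrigation", "irrigate", "water", "watering"]
--     if any(keyword in query for keyword in irrigation_keywords):
--         relevant.append("weather")  # Weather is primary for irrigation decisions
--         relevant.append("crop")     # Crop provides additional context
--
--     # Other crop-related keywords
--     crop_keywords = ["fertilizer", "npk", "pest", "disease", "plant", "sow", "transplant", "spacing"]
--     if any(keyword in query for keyword in crop_keywords):
--         relevant.append("crop")
--
--     # Finance-related keywords
--     finance_keywords = ["price", "market", "mandi", "rate", "cost", "subsidy", "loan", "credit", "bank", "finance", "money", "investment", "profit", "income"]
--     if any(keyword in query for keyword in finance_keywords):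
--         relevant.append("finance")
--
--     # Policy-related keywords
--     policy_keywords = ["scheme", "policy", "government", "pm-kisan", "nabard", "eligible", "eligibility", "apply", "application", "form", "document", "insurance", "pmfby"]
--     if any(keyword in query for keyword in policy_keywords):
--         relevant.append("policy")
--
--     # If no specific keywords, try crop and weather agents
--     if not relevant:
--         relevant = ["crop", "weather"]
--
--     return relevant
-- ===== SOURCE B (Python) =====
-- # Category ids: 0 weather, 1 irrigation, 2 crop, 3 finance, 4 policy
-- _KEYWORDS = []
-- for _cat, _kws in enumerate([
--     ["weather", "rain", "rainfall", "drought", "temperature", "heat", "cold", "storm", "forecast", "alert", "growing", "grow", "suitable", "conditions", "climate", "season"],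
--     ["irrigation", "irrigate", "water", "watering"],
--     ["fertilizer", "npk", "pest", "disease", "plant", "sow", "transplant", "spacing"],
--     ["price", "market", "mandi", "rate", "cost", "subsidy", "loan", "credit", "bank", "finance", "money", "investment", "profit", "income"],
--     ["scheme", "policy", "government", "pm-kisan", "nabard", "eligible", "eligibility", "apply", "application", "form", "document", "insurance", "pmfby"],
-- ]):
--     for _kw in _kws:
--         _KEYWORDS.append((_kw, _cat))
--
-- _AGENTS = [["weather"], ["weather", "crop"], ["crop"], ["finance"], ["policy"]]
--
-- def _identify_relevant_agents(query: str):
--     # Phase 1: text-driven scan — walk every position of the query once and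
--     # test which keywords start there, flagging their category.
--     hit = [False] * len(_AGENTS)
--     for i in range(len(query) + 1):
--         for kw, cat in _KEYWORDS:
--             if query.startswith(kw, i):
--                 hit[cat] = True
--     # Phase 2: assemble agents from the flags in category order.
--     relevant = []
--     for cat in range(len(_AGENTS)):
--         if hit[cat]:
--             relevant += _AGENTS[cat]
--     return relevant if relevant else ["crop", "weather"]
-- ===== Notes on version B (the rewrite author's own statement) =====
-- stated objective: alternative
-- what changed: Replaces A's pattern-driven checks (a separate substring search 'kw in query' for every keyword in five if-blocks) with a text-driven two-phase algorithm: one scan over the query's positions testing keyword prefixes at each position to set per-category flags, then a separate assembly pass that builds the agent list from the flags.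
import Mathlib
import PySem

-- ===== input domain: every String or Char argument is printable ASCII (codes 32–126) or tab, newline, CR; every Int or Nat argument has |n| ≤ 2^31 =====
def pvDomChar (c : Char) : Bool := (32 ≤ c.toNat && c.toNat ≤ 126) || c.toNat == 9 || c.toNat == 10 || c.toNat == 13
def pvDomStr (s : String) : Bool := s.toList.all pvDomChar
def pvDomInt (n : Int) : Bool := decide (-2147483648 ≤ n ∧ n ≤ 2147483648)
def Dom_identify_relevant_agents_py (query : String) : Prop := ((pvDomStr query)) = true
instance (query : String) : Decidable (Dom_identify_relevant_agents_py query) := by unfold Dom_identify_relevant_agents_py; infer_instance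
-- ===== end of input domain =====

-- B replaces A's per-keyword substring searches with a text-driven algorithm: one scan over the
-- query's positions testing keyword prefixes to set category flags, then an assembly pass (objective: alternative algorithm; no speed claim).


-- ===== PORT A =====
def identify_relevant_agents_py (query : String) : List String :=
  let relevant : List String := []
  let weather_keywords : List String := ["weather", "rain", "rainfall", "drought", "temperature", "heat", "cold", "storm", "forecast", "alert", "growing", "grow", "suitable", "conditions", "climate", "season"]
  let relevant := if weather_keywords.any (fun k => PySem.Str.isIn k query) then relevant ++ ["weather"] else relevant
  let irrigation_keywords : List String := ["irrigation", "irrigate", "water", "watering"]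
  let relevant := if irrigation_keywords.any (fun k => PySem.Str.isIn k query) then relevant ++ ["weather"] ++ ["crop"] else relevant
  let crop_keywords : List String := ["fertilizer", "npk", "pest", "disease", "plant", "sow", "transplant", "spacing"]
  let relevant := if crop_keywords.any (fun k => PySem.Str.isIn k query) then relevant ++ ["crop"] else relevant
  let finance_keywords : List String := ["price", "market", "mandi", "rate", "cost", "subsidy", "loan", "credit", "bank", "finance", "money", "investment", "profit", "income"]
  let relevant := if finance_keywords.any (fun k => PySem.Str.isIn k query) then relevant ++ ["finance"] else relevant
  let policy_keywords : List String := ["scheme", "policy", "government", "pm-kisan", "nabard", "eligible", "eligibility", "apply", "application", "form", "document", "insurance", "pmfby"]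
  let relevant := if policy_keywords.any (fun k => PySem.Str.isIn k query) then relevant ++ ["policy"] else relevant
  if relevant = [] then ["crop", "weather"] else relevant

-- ===== PORT B =====
-- B: flat (keyword, category) table; category ids 0 weather, 1 irrigation, 2 crop, 3 finance, 4 policy.
def pvKeywords : List (String × Nat) :=
  [("weather",0), ("rain",0), ("rainfall",0), ("drought",0), ("temperature",0), ("heat",0), ("cold",0), ("storm",0), ("forecast",0), ("alert",0), ("growing",0), ("grow",0), ("suitable",0), ("conditions",0), ("climate",0), ("season",0),
   ("irrigation",1), ("irrigate",1), ("water",1), ("watering",1),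
   ("fertilizer",2), ("npk",2), ("pest",2), ("disease",2), ("plant",2), ("sow",2), ("transplant",2), ("spacing",2),
   ("price",3), ("market",3), ("mandi",3), ("rate",3), ("cost",3), ("subsidy",3), ("loan",3), ("credit",3), ("bank",3), ("finance",3), ("money",3), ("investment",3), ("profit",3), ("income",3),
   ("scheme",4), ("policy",4), ("government",4), ("pm-kisan",4), ("nabard",4), ("eligible",4), ("eligibility",4), ("apply",4), ("application",4), ("form",4), ("document",4), ("insurance",4), ("pmfby",4)]

def pvAgents : List (List String) := [["weather"], ["weather", "crop"], ["crop"], ["finance"], ["policy"]]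

def pvScan (query : String) : List Bool :=
  -- phase 1: scan each position of the query once, testing keyword prefixes there
  -- (Python's query.startswith(kw, i), 0 ≤ i, is exactly: kw is a prefix of the drop-i suffix)
  (List.range (query.toList.length + 1)).foldl (fun hit i =>
    pvKeywords.foldl (fun h p =>
      if PySem.Chars.startswith (query.toList.drop i) p.1.toList then h.set p.2 true else h)
      hit) (List.replicate pvAgents.length false)

def pvAssemble (hit : List Bool) : List String :=
  -- phase 2: assemble the agent list from the category flags
  (List.range pvAgents.length).foldl (fun acc cat =>
    if hit.getD cat false then acc ++ pvAgents.getD cat [] else acc) []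

def identify_relevant_agents_py_alt (query : String) : List String :=
  let relevant := pvAssemble (pvScan query)
  if relevant = [] then ["crop", "weather"] else relevant

-- ===== PRECONDITION & SPEC =====
def Spec_identify_relevant_agents_py (query : String) (out : List String) : Prop := out = identify_relevant_agents_py_alt query
instance (query : String) (out : List String) : Decidable (Spec_identify_relevant_agents_py query out) := by unfold Spec_identify_relevant_agents_py; infer_instance

-- ===== CLAIM (what is proved, stated in full; the proofs are below) =====
def Claim_equal_identify_relevant_agents_py : Prop := ∀ (query : String), Dom_identify_relevant_agents_py query → Spec_identify_relevant_agents_py query (identify_relevant_agents_py query)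

-- ===== LEMMAS AND PROOFS =====

-- the inner fold preserves the flag list's length
lemma pv_inner_length (ps : List (String × Nat)) (f : String × Nat → Bool) (h : List Bool) :
    (ps.foldl (fun h p => if f p then h.set p.2 true else h) h).length = h.length := by
  induction ps generalizing h with
  | nil => rfl
  | cons p ps ih => simp only [List.foldl_cons]; split <;> simp [ih]

-- flag c after the inner fold: old flag OR some keyword of category c matches
lemma pv_inner_getD (ps : List (String × Nat)) (f : String × Nat → Bool) (h : List Bool) (c : Nat)
    (hc : c < h.length) :
    (ps.foldl (fun h p => if f p then h.set p.2 true else h) h).getD c false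
      = (h.getD c false || ps.any (fun p => p.2 == c && f p)) := by
  induction ps generalizing h with
  | nil => simp
  | cons p ps ih =>
    simp only [List.foldl_cons, List.any_cons]
    by_cases hf : f p
    · rw [if_pos hf, ih _ (by simpa using hc)]
      by_cases hpc : p.2 = c
      · subst hpc
        simp [List.getD, List.getElem?_set_self (by omega), hf]
      · have hbc : (p.2 == c) = false := by simpa using hpc
        simp [List.getD, List.getElem?_set_ne (by omega), hf, hbc]
    · rw [if_neg hf, ih _ hc]
      simp [hf]

-- flag c after the position scan: some position has a category-c keyword starting there
lemma pv_scan_getD (q : List Char) (n c : Nat) (hc : c < 5) :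
    (((List.range n).foldl (fun hit i =>
        pvKeywords.foldl (fun h p =>
          if PySem.Chars.startswith (q.drop i) p.1.toList then h.set p.2 true else h) hit)
      (List.replicate 5 false)).getD c false)
      = ((List.range n).any (fun i =>
          pvKeywords.any (fun p => p.2 == c && PySem.Chars.startswith (q.drop i) p.1.toList))) := by
  induction n with
  | zero => interval_cases c <;> rfl
  | succ n ih =>
    rw [List.range_succ]
    simp only [List.foldl_append, List.foldl_cons, List.foldl_nil, List.any_append, List.any_cons, List.any_nil]
    rw [pv_inner_getD pvKeywords (fun p => PySem.Chars.startswith (q.drop n) p.1.toList)]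
    · rw [ih]; simp [Bool.or_comm]
    · have : ∀ (m : Nat) (h0 : List Bool),
        ((List.range m).foldl (fun hit i =>
          pvKeywords.foldl (fun h p =>
            if PySem.Chars.startswith (q.drop i) p.1.toList then h.set p.2 true else h) hit) h0).length = h0.length := by
        intro m
        induction m with
        | zero => intro h0; rfl
        | succ m ihm => intro h0; rw [List.range_succ]; simp [List.foldl_append, pv_inner_length, ihm]
      rw [this]; simpa using hc

-- a keyword starts at some scanned position iff it is a substring (Python 'in')
lemma pv_any_pos (q : List Char) (kw : List Char) :
    ((List.range (q.length + 1)).any (fun i => PySem.Chars.startswith (q.drop i) kw))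
      = PySem.Chars.isIn kw q := by
  rw [Bool.eq_iff_iff]
  simp only [List.any_eq_true, List.mem_range, PySem.Chars.startswith_iff]
  rw [← PySem.Chars.exists_prefix_drop_iff_isIn]
  constructor
  · rintro ⟨i, _, hp⟩; exact ⟨i, hp⟩
  · rintro ⟨j, hp⟩
    refine ⟨min j q.length, by omega, ?_⟩
    rcases le_or_gt j q.length with hj | hj
    · simpa [Nat.min_eq_left hj] using hp
    · have h1 : q.drop j = [] := List.drop_eq_nil_of_le (by omega)
      have h2 : q.drop (min j q.length) = [] := List.drop_eq_nil_of_le (by omega)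
      rw [h2, ← h1]; exact hp

-- swap the two 'any's: scan-order agrees with keyword-order
lemma pv_any_swap {α β : Type} (xs : List α) (ys : List β) (f : α → β → Bool) :
    (xs.any fun x => ys.any fun y => f x y) = (ys.any fun y => xs.any fun x => f x y) := by
  rw [Bool.eq_iff_iff]
  simp only [List.any_eq_true]
  tauto

-- category flag c = A's 'any keyword in query' test for that category
lemma pv_flag (q : List Char) (c : Nat) (hc : c < 5) :
    (((List.range (q.length + 1)).foldl (fun hit i =>
        pvKeywords.foldl (fun h p =>
          if PySem.Chars.startswith (q.drop i) p.1.toList then h.set p.2 true else h) hit)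
      (List.replicate 5 false)).getD c false)
      = (pvKeywords.any fun p => p.2 == c && PySem.Chars.isIn p.1.toList q) := by
  rw [pv_scan_getD q _ c hc]
  rw [pv_any_swap (List.range (q.length + 1)) pvKeywords
      (fun i p => p.2 == c && PySem.Chars.startswith (q.drop i) p.1.toList)]
  congr 1
  funext p
  by_cases hp : p.2 = c
  · have hbc : (p.2 == c) = true := by simpa using hp
    simp only [hbc, Bool.true_and]
    exact pv_any_pos q p.1.toList
  · have hbc : (p.2 == c) = false := by simpa using hp
    simp [hbc]

-- the scanned flag list written out: one 'any keyword in query' Boolean per category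
lemma pv_hit_eq (query : String) :
    pvScan query
    = [(["weather", "rain", "rainfall", "drought", "temperature", "heat", "cold", "storm", "forecast", "alert", "growing", "grow", "suitable", "conditions", "climate", "season"] : List String).any (fun k => PySem.Str.isIn k query),
       (["irrigation", "irrigate", "water", "watering"] : List String).any (fun k => PySem.Str.isIn k query),
       (["fertilizer", "npk", "pest", "disease", "plant", "sow", "transplant", "spacing"] : List String).any (fun k => PySem.Str.isIn k query),
       (["price", "market", "mandi", "rate", "cost", "subsidy", "loan", "credit", "bank", "finance", "money", "investment", "profit", "income"] : List String).any (fun k => PySem.Str.isIn k query),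
       (["scheme", "policy", "government", "pm-kisan", "nabard", "eligible", "eligibility", "apply", "application", "form", "document", "insurance", "pmfby"] : List String).any (fun k => PySem.Str.isIn k query)] := by
  have hlen : (pvScan query).length = 5 := by
    unfold pvScan
    have : ∀ (m : Nat) (h0 : List Bool),
        ((List.range m).foldl (fun hit i =>
          pvKeywords.foldl (fun h p =>
            if PySem.Chars.startswith (query.toList.drop i) p.1.toList then h.set p.2 true else h) hit) h0).length = h0.length := by
      intro m
      induction m with
      | zero => intro h0; rfl
      | succ m ihm => intro h0; rw [List.range_succ]; simp [List.foldl_append, pv_inner_length, ihm]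
    rw [this]; rfl
  apply List.ext_getElem (by simp [hlen])
  intro i h1 h2
  rw [← List.getD_eq_getElem (pvScan query) false h1]
  rw [hlen] at h1
  have hflag : (pvScan query).getD i false
      = (pvKeywords.any fun p => p.2 == i && PySem.Chars.isIn p.1.toList query.toList) := by
    have := pv_flag query.toList i h1
    unfold pvScan
    exact this
  rw [hflag]
  interval_cases i <;> simp [pvKeywords]

-- both shapes agree for every combination of the five category flags
lemma pv_final (W I C F P : Bool) :
    (let relevant : List String := []
     let relevant := if W then relevant ++ ["weather"] else relevant
     let relevant := if I then relevant ++ ["weather"] ++ ["crop"] else relevant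
     let relevant := if C then relevant ++ ["crop"] else relevant
     let relevant := if F then relevant ++ ["finance"] else relevant
     let relevant := if P then relevant ++ ["policy"] else relevant
     if relevant = [] then ["crop", "weather"] else relevant)
    = (let relevant := pvAssemble [W, I, C, F, P]
       if relevant = [] then ["crop", "weather"] else relevant) := by
  cases W <;> cases I <;> cases C <;> cases F <;> cases P <;> rfl

-- ===== VERDICT (by name: the statement is the Claim_ definition above) =====
set_option maxHeartbeats 2000000 in
theorem identify_relevant_agents_py_spec : Claim_equal_identify_relevant_agents_py := by
  intro query _
  unfold Spec_identify_relevant_agents_py identify_relevant_agents_py identify_relevant_agents_py_alt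
  rw [pv_hit_eq]
  exact pv_final _ _ _ _ _
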